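-- pv_equiv track=rewrite | github.com/yoonsunny17/algorithm | 프로그래머스/2/42626. 더 맵게/더 맵게.py | solution
-- ===== SOURCE A (Python) =====
-- import heapq
--
-- def solution(scoville, K):
--     cnt = 0
--     heapq.heapify(scoville)
--
--     while True:
--         one = heapq.heappop(scoville)
--         # 가장 안매운것이 K이상이라면 끝
--         if one >= K:
--             break
--         # 리스트가 다 비었는데 K이상이 안되면 -1 리턴
--         if not len(scoville):
--             return -1
--
--         two = heapq.heappop(scoville)
--         heapq.heappush(scoville, one + two * 2)
--         cnt += 1
--
--     return cnt
-- ===== SOURCE B (Python) =====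
-- def _insort(s, v):
--     # insert v into sorted list s in place, binary search for the position
--     lo, hi = 0, len(s)
--     while lo < hi:
--         mid = (lo + hi) // 2
--         if s[mid] < v:
--             lo = mid + 1
--         else:
--             hi = mid
--     s.insert(lo, v)
--
--
-- def solution(scoville, K):
--     # maintains a fully sorted list instead of a heap; does not mutate the argument
--     s = sorted(scoville)
--     cnt = 0
--     while len(s) >= 2 and s[0] < K:
--         merged = s[0] + 2 * s[1]
--         del s[:2]
--         _insort(s, merged)
--         cnt += 1
--     if s and s[0] >= K:
--         return cnt
--     return -1
-- ===== Notes on version B (the rewrite author's own statement) =====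
-- stated objective: alternative
-- what changed: Replaces the binary heap with a fully sorted list built once by sorted(): the two smallest elements are taken from the front and the merged value is re-inserted in place by a hand-written binary-search insertion; the while-True/break loop with in-place mutation of the argument becomes a guarded loop plus a final check.
import Mathlib
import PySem

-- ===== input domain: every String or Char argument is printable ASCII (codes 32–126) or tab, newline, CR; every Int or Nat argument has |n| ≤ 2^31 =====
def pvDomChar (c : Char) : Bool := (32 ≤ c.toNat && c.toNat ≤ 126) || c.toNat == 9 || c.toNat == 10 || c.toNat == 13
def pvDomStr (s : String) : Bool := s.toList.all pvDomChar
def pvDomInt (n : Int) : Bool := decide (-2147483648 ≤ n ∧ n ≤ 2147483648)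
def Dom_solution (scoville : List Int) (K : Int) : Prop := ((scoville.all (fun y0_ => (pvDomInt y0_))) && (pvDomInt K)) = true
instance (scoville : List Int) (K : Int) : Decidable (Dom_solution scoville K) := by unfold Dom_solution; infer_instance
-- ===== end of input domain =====

-- B maintains a fully sorted list (pop the two smallest at the front, binary-search ordered insert)
-- instead of A's binary heap; equivalence is about the RETURN value only (A additionally
-- heapifies/mutates its `scoville` argument in place, B does not mutate it).

-- ===== PORT A =====
-- heapq.heappop is a standard-library call; it is ported by its exact contract on Int
-- values: return the minimum value of the heap and remove one occurrence of it (equal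
-- Ints are indistinguishable, so which occurrence is removed cannot affect the result).
def popMinA (h : List Int) : Option (Int × List Int) :=
  match PySem.List.min? h (fun x => x) with
  | none => none
  | some m =>
    match PySem.List.remove? h m with
    | none => none
    | some rest => some (m, rest)

-- the `while True` loop of A; fuel = current length (each iteration shortens the heap
-- by one, so length is enough fuel; fuel 0 is reached only for the empty input, where
-- the Python raises IndexError — excluded by Pre_solution).
def loopA (K : Int) : Nat → List Int → Int → Int
  | 0, _, _ => 0
  | fuel + 1, h, cnt =>
    match popMinA h with
    | none => 0
    | some (one, h1) =>
      if one ≥ K then cnt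
      else
        match popMinA h1 with
        | none => -1
        | some (two, h2) => loopA K fuel (h2 ++ [one + two * 2]) (cnt + 1)

def solution (scoville : List Int) (K : Int) : Int :=
  loopA K scoville.length scoville 0

-- ===== PORT B =====
-- _insort's `while lo < hi` binary search for the insertion point; fuel = hi - lo at the
-- first call (each step shrinks hi - lo, so that is enough fuel). s[mid] is read with
-- getD 0: exact, since lo ≤ mid < hi ≤ len holds throughout, so mid is always in range.
def binPos (s : List Int) (v : Int) : Nat → Nat → Nat → Nat
  | 0, lo, _ => lo
  | fuel + 1, lo, hi =>
    if lo < hi then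
      let mid := (lo + hi) / 2
      if s.getD mid 0 < v then binPos s v fuel (mid + 1) hi else binPos s v fuel lo mid
    else lo

-- _insort: s.insert(lo, v) is List.insertIdx lo v s — exact since 0 ≤ lo ≤ len(s)
def insortB (s : List Int) (v : Int) : List Int :=
  s.insertIdx (binPos s v s.length 0 s.length) v

-- B's `while len(s) >= 2 and s[0] < K` loop; fuel = current length, same argument as loopA
def loopB (K : Int) : Nat → List Int → Int → (List Int × Int)
  | 0, s, cnt => (s, cnt)
  | fuel + 1, s, cnt =>
    match s with
    | a :: b :: rest =>
      if a < K then loopB K fuel (insortB rest (a + 2 * b)) (cnt + 1) else (s, cnt)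
    | _ => (s, cnt)

def solution_alt (scoville : List Int) (K : Int) : Int :=
  let s0 := PySem.List.sorted scoville (fun x => x) false
  let r := loopB K scoville.length s0 0
  match r.1 with
  | a :: _ => if a ≥ K then r.2 else -1
  | [] => -1

-- ===== PRECONDITION & SPEC =====
-- Pre_ excludes only the empty list, on which A's first heappop raises IndexError.
def Pre_solution (scoville : List Int) (K : Int) : Prop := scoville ≠ []
instance (scoville : List Int) (K : Int) : Decidable (Pre_solution scoville K) := by
  unfold Pre_solution; infer_instance

def pvWitness_solution : List Int × Int := ([1, 2, 3, 9, 10, 12], 7)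

def Spec_solution (scoville : List Int) (K : Int) (out : Int) : Prop := out = solution_alt scoville K
instance (scoville : List Int) (K : Int) (out : Int) : Decidable (Spec_solution scoville K out) := by unfold Spec_solution; infer_instance

-- ===== CLAIM (what is proved, stated in full; the proofs are below) =====
def Claim_equal_solution : Prop := ∀ (scoville : List Int) (K : Int), Dom_solution scoville K → Pre_solution scoville K → Spec_solution scoville K (solution scoville K)

-- ===== LEMMAS AND PROOFS =====

-- insertIdx at the length of the <-prefix is Mathlib's orderedInsert for ≤
theorem insertIdx_takeWhile_eq_orderedInsert (v : Int) (xs : List Int) :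
    xs.insertIdx (xs.takeWhile (fun x => decide (x < v))).length v
      = List.orderedInsert (· ≤ ·) v xs := by
  induction xs with
  | nil => rfl
  | cons x xs ih =>
    simp only [List.takeWhile, List.orderedInsert]
    by_cases h : x < v
    · have hv : ¬ v ≤ x := not_le.mpr h
      simp [h, hv, List.insertIdx_succ_cons, ih]
    · simp [h, not_lt.mp h]

-- the takeWhile-prefix length is pinned by its boundary properties
theorem takeWhile_length_eq (q : Int → Bool) (xs : List Int) (n : Nat)
    (hn : n ≤ xs.length)
    (h1 : ∀ i, i < n → q (xs.getD i 0) = true)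
    (h2 : n < xs.length → q (xs.getD n 0) = false) :
    (xs.takeWhile q).length = n := by
  induction xs generalizing n with
  | nil =>
    simp only [List.length_nil] at hn
    simp only [List.takeWhile_nil, List.length_nil]
    omega
  | cons x xs ih =>
    match n with
    | 0 =>
      have hx : q x = false := by simpa using h2 (by simp)
      simp [List.takeWhile_cons, hx]
    | n + 1 =>
      have hx : q x = true := by simpa using h1 0 (by omega)
      simp only [List.takeWhile, hx, List.length_cons]
      rw [ih n (by simpa using hn) (fun i hi => by simpa using h1 (i + 1) (by omega))
        (fun h => by simpa using h2 (by simpa using h))]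

-- the binary search lands on the length of the <-prefix of a sorted list
theorem binPos_correct (s : List Int) (v : Int) (hs : s.Sorted (· ≤ ·)) :
    ∀ (fuel lo hi : Nat), hi ≤ s.length → lo ≤ hi → hi - lo ≤ fuel →
    (∀ i, i < lo → s.getD i 0 < v) →
    (∀ i, hi ≤ i → i < s.length → ¬ s.getD i 0 < v) →
    binPos s v fuel lo hi = (s.takeWhile (fun x => decide (x < v))).length := by
  have mono : ∀ i j, i ≤ j → j < s.length → s.getD i 0 ≤ s.getD j 0 := by
    intro i j hij hj
    rcases Nat.eq_or_lt_of_le hij with rfl | hlt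
    · exact le_refl _
    · rw [List.getD_eq_getElem s 0 (by omega), List.getD_eq_getElem s 0 hj]
      exact List.pairwise_iff_getElem.mp hs i j (by omega) hj hlt
  intro fuel
  induction fuel with
  | zero =>
    intro lo hi h1 h2 h3 hlow hhigh
    have : lo = hi := by omega
    subst this
    simp only [binPos]
    exact (takeWhile_length_eq _ s lo (by omega)
      (fun i hi' => by simpa using hlow i hi')
      (fun h => by simpa using hhigh lo (le_refl _) h)).symm
  | succ f ihf =>
    intro lo hi h1 h2 h3 hlow hhigh
    by_cases hlh : lo < hi
    · simp only [binPos, if_pos hlh]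
      by_cases hmid : s.getD ((lo + hi) / 2) 0 < v
      · simp only [if_pos hmid]
        exact ihf ((lo + hi) / 2 + 1) hi h1 (by omega) (by omega)
          (fun i hi' => lt_of_le_of_lt (mono i ((lo + hi) / 2) (by omega) (by omega)) hmid)
          hhigh
      · simp only [if_neg hmid]
        exact ihf lo ((lo + hi) / 2) (by omega) (by omega) (by omega) hlow
          (fun i hi' hi'' => fun hcon =>
            hmid (lt_of_le_of_lt (mono ((lo + hi) / 2) i hi' hi'') hcon))
    · have : lo = hi := by omega
      subst this
      simp only [binPos, if_neg hlh]
      exact (takeWhile_length_eq _ s lo (by omega)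
        (fun i hi' => by simpa using hlow i hi')
        (fun h => by simpa using hhigh lo (le_refl _) h)).symm

theorem insortB_eq_orderedInsert (s : List Int) (v : Int) (hs : s.Sorted (· ≤ ·)) :
    insortB s v = List.orderedInsert (· ≤ ·) v s := by
  unfold insortB
  rw [binPos_correct s v hs s.length 0 s.length (le_refl _) (by omega) (by omega)
      (by omega) (by omega)]
  exact insertIdx_takeWhile_eq_orderedInsert v s

theorem insortB_perm (s : List Int) (v : Int) (hs : s.Sorted (· ≤ ·)) :
    (insortB s v).Perm (v :: s) := by
  rw [insortB_eq_orderedInsert s v hs]; exact List.perm_orderedInsert _ _ _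

theorem insortB_sorted (s : List Int) (v : Int) (hs : s.Sorted (· ≤ ·)) :
    (insortB s v).Sorted (· ≤ ·) := by
  rw [insortB_eq_orderedInsert s v hs]; exact List.Pairwise.orderedInsert v s hs

-- popMinA on a list permuting a sorted nonempty list pops the head value
theorem popMinA_of_perm_sorted (h : List Int) (a : Int) (t : List Int)
    (hp : h.Perm (a :: t)) (hs : (a :: t).Sorted (· ≤ ·)) :
    ∃ h1, popMinA h = some (a, h1) ∧ h1.Perm t := by
  have hmem : a ∈ h := hp.mem_iff.mpr (by simp)
  have hmin : PySem.List.min? h (fun x => x) ≠ none := by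
    intro hn
    rw [PySem.List.min?_eq_none_iff] at hn
    simp [hn] at hmem
  obtain ⟨m, hm⟩ := Option.ne_none_iff_exists'.mp hmin
  have hmmem : m ∈ h := PySem.List.min?_mem hm
  have hmmin : ∀ y ∈ h, m ≤ y := by
    intro y hy
    simpa using PySem.List.min?_isMin hm y hy
  -- m = a : m ∈ a :: t is ≥ a (head of sorted); and m ≤ a since a ∈ h
  have hma : m = a := by
    have h1 : a ≤ m := by
      have : m ∈ a :: t := hp.mem_iff.mp hmmem
      rcases List.mem_cons.mp this with h' | h'
      · exact le_of_eq h'.symm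
      · exact List.rel_of_pairwise_cons hs h'
    have h2 : m ≤ a := hmmin a hmem
    omega
  subst hma
  have hrem : PySem.List.remove? h m = some (h.erase m) :=
    PySem.List.remove?_eq_some_erase h m hmmem
  refine ⟨h.erase m, ?_, ?_⟩
  · simp [popMinA, hm, hrem]
  · have := hp.erase m
    simpa using this

-- the core loop correspondence: loopA on any permutation of a sorted list s computes
-- B's loop-then-final-check on s, provided fuel = length and the list is nonempty
theorem loop_agree (K : Int) : ∀ (n : Nat) (h s : List Int) (cnt : Int),
    h.length = n → s ≠ [] → h.Perm s → s.Sorted (· ≤ ·) →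
    loopA K n h cnt =
      (match (loopB K n s cnt).1 with
       | a :: _ => if a ≥ K then (loopB K n s cnt).2 else -1
       | [] => -1) := by
  intro n
  induction n with
  | zero =>
    intro h s cnt hlen hne hp _
    have : s.length = 0 := by rw [← hp.length_eq, hlen]
    exact absurd (List.length_eq_zero_iff.mp this) hne
  | succ m ih =>
    intro h s cnt hlen hne hp hs
    obtain ⟨a, t, rfl⟩ := List.exists_cons_of_ne_nil hne
    obtain ⟨h1, hpop, hp1⟩ := popMinA_of_perm_sorted h a t hp hs
    have hlen1 : h1.length = m := by
      have := hp.length_eq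
      have := hp1.length_eq
      simp at *; omega
    by_cases hK : a ≥ K
    · -- A breaks with cnt; B's loop guard a < K fails (or list too short), final check a ≥ K
      simp only [loopA, hpop, if_pos hK, loopB]
      match t with
      | [] => simp [hK]
      | b :: rest => simp [not_lt.mpr hK, hK]
    · match t with
      | [] =>
        -- one element, below K: A pops it, heap empty, returns -1; B's final check fails
        have h1nil : h1 = [] := hp1.eq_nil
        simp only [loopA, loopB, hpop, h1nil]
        simp [popMinA, PySem.List.min?, hK]
      | b :: rest =>
        have hs1 : (b :: rest).Sorted (· ≤ ·) := hs.of_cons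
        obtain ⟨h2, hpop2, hp2⟩ := popMinA_of_perm_sorted h1 b rest hp1 hs1
        have haK : a < K := not_le.mp hK
        simp only [loopA, hpop, if_neg hK, hpop2, loopB, if_pos haK]
        rw [show a + b * 2 = a + 2 * b from by ring]
        apply ih
        · have e1 : h2.length = rest.length := hp2.length_eq
          have e2 : h1.length = rest.length + 1 := by simpa using hp1.length_eq
          simp only [List.length_append, List.length_cons, List.length_nil]
          omega
        · intro hnil
          have := (insortB_perm rest (a + 2 * b) hs1.of_cons).symm
          rw [hnil] at this
          exact absurd this.eq_nil (by simp)
        · exact ((List.perm_append_singleton _ _).trans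
            ((hp2.cons _).trans (insortB_perm rest (a + 2 * b) hs1.of_cons).symm))
        · exact insortB_sorted _ _ (hs1.of_cons)

-- ===== VERDICT (by name: the statement is the Claim_ definition above) =====
theorem solution_spec : Claim_equal_solution := by
  intro scoville K _ hpre
  unfold Spec_solution solution solution_alt
  have hperm : scoville.Perm (PySem.List.sorted scoville (fun x => x) false) :=
    (PySem.List.sorted_perm scoville (fun x => x) false).symm
  have hsorted : (PySem.List.sorted scoville (fun x => x) false).Sorted (· ≤ ·) :=
    PySem.List.sorted_pairwise scoville (fun x => x)
  have hne : PySem.List.sorted scoville (fun x => x) false ≠ [] := by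
    intro h; exact hpre ((PySem.List.sorted_eq_nil_iff _ _ _).mp h)
  exact loop_agree K scoville.length scoville _ 0 rfl hne hperm hsorted
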